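-- pv_equiv track=rewrite | github.com/WangFei-2019/SNARE | snare/datasets_zoo/data_des.py | _get_trigrams
-- ===== SOURCE A (Python) =====
-- def _get_trigrams(sentence):
-- 	# Taken from https://github.com/lingo-mit/context-ablations/blob/478fb18a9f9680321f0d37dc999ea444e9287cc0/code/transformers/src/transformers/data/data_augmentation.py
-- 	trigrams = []
-- 	trigram = []
-- 	for i in range(len(sentence)):
-- 		trigram.append(sentence[i])
-- 		if i % 3 == 2:
-- 			trigrams.append(trigram[:])
-- 			trigram = []
-- 	if trigram:
-- 		trigrams.append(trigram)
-- 	return trigrams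
-- ===== SOURCE B (Python) =====
-- def _get_trigrams(sentence):
--     return [list(sentence[i:i + 3]) for i in range(0, len(sentence), 3)]
-- ===== Notes on version B (the rewrite author's own statement) =====
-- stated objective: simpler
-- what changed: Replaced the per-element accumulate-and-flush loop (i%3==2 counter plus trailing-remainder check) by a one-line slice-based comprehension over step-3 start indices; the final short slice yields the partial group automatically.
import Mathlib
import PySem

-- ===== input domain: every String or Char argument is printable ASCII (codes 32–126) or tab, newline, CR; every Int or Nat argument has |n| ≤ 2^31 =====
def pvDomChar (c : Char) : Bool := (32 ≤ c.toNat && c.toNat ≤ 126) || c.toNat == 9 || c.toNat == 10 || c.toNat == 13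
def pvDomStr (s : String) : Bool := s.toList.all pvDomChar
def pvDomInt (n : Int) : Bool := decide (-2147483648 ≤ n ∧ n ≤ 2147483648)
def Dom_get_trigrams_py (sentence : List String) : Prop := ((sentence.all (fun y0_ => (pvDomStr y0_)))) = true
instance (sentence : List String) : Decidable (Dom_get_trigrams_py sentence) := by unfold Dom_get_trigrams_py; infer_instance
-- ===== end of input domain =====

-- B replaces A's per-element accumulate-and-flush loop by a slice-based comprehension over step-3 start indices (simpler; same cost).

-- ===== PORT A =====
-- loop body: trigram.append(sentence[i]); if i % 3 == 2: trigrams.append(trigram[:]); trigram = []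
def get_trigrams_py (sentence : List String) : List (List String) :=
  let st :=
    (PySem.List.pyRange 0 (sentence.length : Int) 1).foldl
      (fun (st : List (List String) × List String) i =>
        let trigram := st.2 ++ [PySem.List.pyGetD sentence i ""]   -- i is always in range
        if PySem.Int.mod i 3 = 2 then (st.1 ++ [trigram], [])
        else (st.1, trigram))
      ([], [])
  if st.2 ≠ [] then st.1 ++ [st.2] else st.1

-- ===== PORT B =====
def get_trigrams_py_alt (sentence : List String) : List (List String) :=
  (PySem.List.pyRange 0 (sentence.length : Int) 3).map
    (fun i => PySem.List.slice sentence (some i) (some (i + 3)))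

-- ===== PRECONDITION & SPEC =====
def Spec_get_trigrams_py (sentence : List String) (out : List (List String)) : Prop := out = get_trigrams_py_alt sentence
instance (sentence : List String) (out : List (List String)) : Decidable (Spec_get_trigrams_py sentence out) := by unfold Spec_get_trigrams_py; infer_instance

-- ===== CLAIM (what is proved, stated in full; the proofs are below) =====
def Claim_equal_get_trigrams_py : Prop := ∀ (sentence : List String), Dom_get_trigrams_py sentence → Spec_get_trigrams_py sentence (get_trigrams_py sentence)

-- ===== LEMMAS AND PROOFS =====

-- groups-of-three normal form: full groups and the trailing remainder
def g3 : List String → List (List String) × List String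
  | a :: b :: c :: r => let p := g3 r; ([a, b, c] :: p.1, p.2)
  | r => ([], r)

theorem pyRange_three_nil (a b : Int) (h : b ≤ a) : PySem.List.pyRange a b 3 = [] := by
  rw [PySem.List.pyRange_of_pos a b (by omega)]
  simp [show ¬ a < b by omega]

theorem pyRange_three_cons (a b : Int) (h : a < b) :
    PySem.List.pyRange a b 3 = a :: PySem.List.pyRange (a + 3) b 3 := by
  rw [PySem.List.pyRange_of_pos a b (by omega), PySem.List.pyRange_of_pos (a + 3) b (by omega)]
  have hc : ((b - a + 3 - 1) / 3).toNat
      = (if a + 3 < b then ((b - (a + 3) + 3 - 1) / 3).toNat else 0) + 1 := by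
    split_ifs with h3 <;> omega
  rw [if_pos h, hc, List.range_succ_eq_map]
  refine congrArg₂ List.cons (by norm_num) ?_
  rw [List.map_map]
  apply List.map_congr_left
  intro k _
  simp only [Function.comp_apply, Nat.succ_eq_add_one]
  push_cast
  ring

-- B's map over step-3 start indices computes g3's groups plus the remainder
theorem loopB (s : List String) : ∀ (xs : List String) (j : Nat), s.drop j = xs →
    (PySem.List.pyRange (j : Int) (s.length : Int) 3).map
        (fun i => PySem.List.slice s (some i) (some (i + 3)))
      = (g3 xs).1 ++ (if (g3 xs).2 = [] then [] else [(g3 xs).2]) := by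
  intro xs
  induction xs using g3.induct with
  | case2 r hr =>
    intro j hj
    -- r matches the catch-all arm, so r = [], [a] or [a, b]
    match r, hr with
    | a :: b :: c :: r', hr => exact absurd rfl (fun h => hr a b c r' h)
    | [], _ =>
      have hlen : s.length ≤ j := by
        have := List.drop_eq_nil_iff.mp hj
        omega
      rw [pyRange_three_nil _ _ (by exact_mod_cast hlen)]
      simp [g3]
    | [a], _ =>
      have hlen : s.length = j + 1 := by
        have := congrArg List.length hj
        simp [List.length_drop] at this
        omega
      rw [pyRange_three_cons _ _ (by exact_mod_cast (by omega : j < s.length)),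
          pyRange_three_nil _ _ (by omega)]
      simp only [List.map_cons, List.map_nil]
      rw [show ((j : Int) + 3) = (((j + 3 : Nat)) : Int) by push_cast; ring,
          PySem.List.slice_natCast, hj]
      simp [g3]
    | [a, b], _ =>
      have hlen : s.length = j + 2 := by
        have := congrArg List.length hj
        simp [List.length_drop] at this
        omega
      rw [pyRange_three_cons _ _ (by exact_mod_cast (by omega : j < s.length)),
          pyRange_three_nil _ _ (by omega)]
      simp only [List.map_cons, List.map_nil]
      rw [show ((j : Int) + 3) = (((j + 3 : Nat)) : Int) by push_cast; ring,
          PySem.List.slice_natCast, hj]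
      simp [g3]
  | case1 a b c r ih =>
    intro j hj
    have hlen : j + 3 ≤ s.length := by
      have := congrArg List.length hj
      simp [List.length_drop] at this
      omega
    have hdrop : s.drop (j + 3) = r := by
      have h1 : s.drop (j + 3) = (s.drop j).drop 3 := by rw [List.drop_drop]; try ring_nf
      rw [h1, hj]; rfl
    rw [pyRange_three_cons _ _ (by exact_mod_cast (by omega : j < s.length))]
    simp only [List.map_cons]
    rw [show ((j : Int) + 3) = (((j + 3 : Nat)) : Int) by push_cast; ring]
    rw [PySem.List.slice_natCast, hj, ih (j + 3) hdrop]
    simp [g3]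

-- A's index loop: with t the pending trigram, invariant j % 3 = t.length
theorem loopA (s : List String) : ∀ (xs : List String) (j : Nat)
    (acc : List (List String)) (t : List String),
    s.drop j = xs → j % 3 = t.length →
    (PySem.List.pyRange (j : Int) (s.length : Int) 1).foldl
        (fun (st : List (List String) × List String) i =>
          let trigram := st.2 ++ [PySem.List.pyGetD s i ""]
          if PySem.Int.mod i 3 = 2 then (st.1 ++ [trigram], [])
          else (st.1, trigram))
        (acc, t)
      = (acc ++ (g3 (t ++ xs)).1, (g3 (t ++ xs)).2) := by
  intro xs
  induction xs with
  | nil =>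
    intro j acc t hj hmod
    have hlen : s.length ≤ j := by
      have := List.drop_eq_nil_iff.mp hj
      omega
    rw [PySem.List.pyRange_one_eq_nil (by exact_mod_cast hlen)]
    have ht : t.length < 3 := by omega
    match t, ht with
    | [], _ => simp [g3]
    | [a], _ => simp [g3]
    | [a, b], _ => simp [g3]
  | cons x xs ih =>
    intro j acc t hj hmod
    have hjlt : j < s.length := by
      by_contra h
      rw [List.drop_eq_nil_of_le (by omega)] at hj
      simp at hj
    have hget : PySem.List.pyGetD s (j : Int) "" = x := by
      rw [PySem.List.pyGetD_natCast]
      have h0 : s[j + 0]? = some x := by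
        rw [← List.getElem?_drop, hj]; rfl
      simp only [Nat.add_zero] at h0
      simp [List.getD_eq_getElem?_getD, h0]
    have hdrop : s.drop (j + 1) = xs := by
      have h1 : s.drop (j + 1) = (s.drop j).drop 1 := by rw [List.drop_drop]; try ring_nf
      rw [h1, hj]; rfl
    rw [PySem.List.pyRange_one_cons (by exact_mod_cast hjlt)]
    simp only [List.foldl_cons, hget]
    have hmodcast : PySem.Int.mod (j : Int) 3 = ((j % 3 : Nat) : Int) := by
      exact_mod_cast PySem.Int.mod_natCast j 3
    rw [show ((j : Int) + 1) = (((j + 1 : Nat)) : Int) by push_cast; ring]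
    by_cases h2 : j % 3 = 2
    · -- flush: t has exactly two elements
      have ht2 : t.length = 2 := by omega
      match t, ht2 with
      | [aa, bb], _ =>
        rw [if_pos (by rw [hmodcast, h2]; norm_num)]
        rw [ih (j + 1) (acc ++ [[aa, bb] ++ [x]]) [] hdrop (by simp; omega)]
        simp [g3]
    · have hne : ¬ PySem.Int.mod (j : Int) 3 = 2 := by
        rw [hmodcast]
        exact_mod_cast (by omega : ¬ ((j % 3 : Nat) : Int) = ((2 : Nat) : Int))
      rw [if_neg hne]
      rw [ih (j + 1) acc (t ++ [x]) hdrop (by simp; omega)]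
      simp

-- ===== VERDICT (by name: the statement is the Claim_ definition above) =====
theorem get_trigrams_py_spec : Claim_equal_get_trigrams_py := by
  intro sentence _
  unfold Spec_get_trigrams_py get_trigrams_py get_trigrams_py_alt
  rw [show (0 : Int) = ((0 : Nat) : Int) by norm_num]
  rw [loopA sentence sentence 0 [] [] (by simp) (by simp),
      loopB sentence sentence 0 (by simp)]
  simp only [List.nil_append]
  by_cases h : (g3 sentence).2 = [] <;> simp [h]
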